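-- pv_equiv track=rewrite | github.com/TianleJin/Algorithmic-Contests-Solutions | Google-Kickstart/2020/Round-A/d.py | solve
-- ===== SOURCE A (Python) =====
-- class Node:
--     def __init__(self):
--         self.cnt = 0
--         self.children = {}
--
-- def solve(N, K, strings):
--     root = Node()
--     for s in strings:
--         curr = root
--         for ch in s:
--             if ch not in curr.children:
--                 curr.children[ch] = Node()
--             curr = curr.children[ch]
--         curr.cnt += 1
--
--     def dfs(root, depth=0):
--         ans = 0
--         if root.children:
--             for ch in root.children:
--                 child = root.children[ch]
--                 ans += dfs(child, depth + 1)
--                 root.cnt += child.cnt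
--
--         while root.cnt >= K:
--             root.cnt -= K
--             ans += depth
--         return ans
--
--     return dfs(root)
-- ===== SOURCE B (Python) =====
-- def solve(N, K, strings):
--     # Count, for every nonempty prefix p of any string, how many strings have
--     # that prefix; each prefix shared by m strings yields m // K groups at its
--     # depth, which sums exactly to the trie greedy's answer.
--     prefixes = [s[:i] for s in strings for i in range(1, len(s) + 1)]
--     counts = {}
--     for p in prefixes:
--         counts[p] = counts.get(p, 0) + 1
--     return sum(c // K for c in counts.values())
-- ===== Notes on version B (the rewrite author's own statement) =====
-- stated objective: simpler
-- what changed: Replaces the mutable trie with recursive DFS and repeated-subtraction grouping by a flat counter of all nonempty string prefixes, returning sum(count // K) over the counter, which provably equals the trie greedy's answer.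
import Mathlib
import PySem

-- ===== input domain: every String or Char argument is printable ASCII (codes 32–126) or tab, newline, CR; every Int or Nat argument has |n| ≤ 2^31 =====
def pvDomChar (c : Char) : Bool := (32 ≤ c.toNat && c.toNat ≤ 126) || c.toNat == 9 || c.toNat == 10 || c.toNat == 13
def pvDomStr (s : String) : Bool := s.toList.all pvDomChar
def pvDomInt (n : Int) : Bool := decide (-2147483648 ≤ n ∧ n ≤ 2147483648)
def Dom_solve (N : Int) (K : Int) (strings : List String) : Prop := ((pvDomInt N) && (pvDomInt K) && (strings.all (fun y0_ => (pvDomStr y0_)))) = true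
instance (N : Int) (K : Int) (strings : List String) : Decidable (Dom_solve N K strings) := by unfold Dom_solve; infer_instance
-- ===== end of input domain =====

-- B replaces A's mutable trie + recursive DFS with a flat counter of all nonempty
-- prefixes and returns sum(count // K): a simpler, structurally different exact
-- re-implementation (equal to the trie greedy's answer; proved below).

-- ===== PORT A =====
-- The Python trie (Node.cnt, dict of children) is encoded first-child/next-sibling:
-- 'cons ch cnt children siblings'; a node's children dict is such a sibling chain
-- (insertion order = append at the end, like the Python dict).
inductive PForest
  | nil : PForest
  | cons : Char → Int → PForest → PForest → PForest
deriving DecidableEq, Repr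

-- fresh path created when a char is missing: Python makes empty nodes down the
-- rest of the string and then does 'curr.cnt += 1' at the end
def newNode : List Char → Int × PForest
  | [] => (1, PForest.nil)
  | b :: p => (0, PForest.cons b (newNode p).1 (newNode p).2 PForest.nil)

-- 'for ch in s: descend/create; curr.cnt += 1', below the root (path a :: p)
def insertC : PForest → Char → List Char → PForest
  | PForest.nil, a, p => PForest.cons a (newNode p).1 (newNode p).2 PForest.nil
  | PForest.cons b c f sib, a, p =>
      if b = a then
        match p with
        | [] => PForest.cons b (c + 1) f sib
        | x :: rest => PForest.cons b c (insertC f x rest) sib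
      else PForest.cons b c f (insertC sib a p)

-- one string inserted at the root (root state = (root.cnt, root.children))
def insertS : Int × PForest → List Char → Int × PForest
  | (c, f), [] => (c + 1, f)
  | (c, f), a :: p => (c, insertC f a p)

-- 'while root.cnt >= K: root.cnt -= K; ans += depth'  (the 1 ≤ K test only makes
-- the recursion total: Python loops forever when K ≤ 0, excluded by Pre_solve)
def whileLoop (K cnt ans d : Int) : Int × Int :=
  if h : 1 ≤ K ∧ K ≤ cnt then whileLoop K (cnt - K) (ans + d) d else (ans, cnt)
termination_by cnt.toNat
decreasing_by omega

-- dfs over a sibling chain: returns (sum of answers, sum of final cnt fields)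
def dfsF : PForest → Int → Int → Int × Int
  | PForest.nil, _, _ => (0, 0)
  | PForest.cons _ c f sib, K, d =>
      let r := dfsF f K (d + 1)
      let w := whileLoop K (c + r.2) r.1 d
      let rs := dfsF sib K d
      (w.1 + rs.1, w.2 + rs.2)

def solve (N : Int) (K : Int) (strings : List String) : Int :=
  let root := strings.foldl (fun t s => insertS t s.toList) (0, PForest.nil)
  let r := dfsF root.2 K 1
  (whileLoop K (root.1 + r.2) r.1 0).1

-- ===== PORT B =====
-- [s[:i] for s in strings for i in range(1, len(s) + 1)]
def prefixesOf (s : String) : List String :=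
  (PySem.List.pyRange 1 (PySem.Str.len s + 1)).map (fun i => PySem.Str.slice s none (some i))

def solve_alt (N : Int) (K : Int) (strings : List String) : Int :=
  let prefixes := strings.flatMap prefixesOf
  let counts := prefixes.foldl (fun d p => d.insert p (d.getD p 0 + 1)) PySem.Dict.empty
  (counts.values.map (fun c => PySem.Int.floordiv c K)).sum

-- ===== PRECONDITION & SPEC =====
-- Pre_solve excludes only K ≤ 0, where Python A never returns (its
-- 'while root.cnt >= K: root.cnt -= K' loops forever since cnt stays ≥ 0).
def Pre_solve (N : Int) (K : Int) (strings : List String) : Prop := 1 ≤ K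
instance (N : Int) (K : Int) (strings : List String) : Decidable (Pre_solve N K strings) := by unfold Pre_solve; infer_instance
def pvWitness_solve : Int × Int × List String := (4, 2, ["aa", "ab", "ab", "b"])

def Spec_solve (N : Int) (K : Int) (strings : List String) (out : Int) : Prop := out = solve_alt N K strings
instance (N : Int) (K : Int) (strings : List String) (out : Int) : Decidable (Spec_solve N K strings out) := by unfold Spec_solve; infer_instance

-- ===== CLAIM (what is proved, stated in full; the proofs are below) =====
def Claim_equal_solve : Prop := ∀ (N : Int) (K : Int) (strings : List String), Dom_solve N K strings → Pre_solve N K strings → Spec_solve N K strings (solve N K strings)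

-- ===== LEMMAS AND PROOFS =====

-- ---- analysis functions on the trie (proof helpers only) ----

-- total number of string-ends in a chain of subtrees
def SF : PForest → Int
  | PForest.nil => 0
  | PForest.cons _ c f sib => (c + SF f) + SF sib

-- all (path, subtree total) entries of a chain
def entF : PForest → List (List Char × Int)
  | PForest.nil => []
  | PForest.cons b c f sib =>
      ([b], c + SF f) :: ((entF f).map (fun e => (b :: e.1, e.2)) ++ entF sib)

-- subtree total at a path (0 if absent; 0 at the empty path)
def SatF : PForest → List Char → Int
  | _, [] => 0
  | PForest.nil, _ :: _ => 0
  | PForest.cons b c f sib, a :: p =>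
      if b = a then (match p with | [] => c + SF f | _ :: _ => SatF f p)
      else SatF sib (a :: p)

def charsF : PForest → List Char
  | PForest.nil => []
  | PForest.cons b _ _ sib => b :: charsF sib

-- well-formedness invariant of tries built by insertion
def WFF : PForest → Prop
  | PForest.nil => True
  | PForest.cons b c f sib => 0 ≤ c ∧ 1 ≤ c + SF f ∧ b ∉ charsF sib ∧ WFF f ∧ WFF sib

-- per-chain sums of quotients and remainders
def QF (K : Int) : PForest → Int
  | PForest.nil => 0
  | PForest.cons _ c f sib => (c + SF f) / K + QF K sib

def MF (K : Int) : PForest → Int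
  | PForest.nil => 0
  | PForest.cons _ c f sib => (c + SF f) % K + MF K sib

-- the list of nonempty prefixes of a char list
def prefCL (l : List Char) : List (List Char) :=
  (List.range l.length).map (fun k => l.take (k + 1))

def allP (strings : List String) : List (List Char) :=
  strings.flatMap (fun s => prefCL s.toList)

-- ---- while loop ----
theorem whileLoop_eq (K cnt ans d : Int) (hK : 1 ≤ K) (hc : 0 ≤ cnt) :
    whileLoop K cnt ans d = (ans + d * (cnt / K), cnt % K) := by
  induction cnt, ans using whileLoop.induct (K := K) (d := d) with
  | case1 cnt ans h ih =>
      rw [whileLoop, dif_pos h, ih (by omega)]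
      simp only [Prod.mk.injEq]
      constructor
      · have h1 : (cnt - K) / K = cnt / K - 1 := by
          have := Int.add_mul_ediv_right cnt (-1) (by omega : K ≠ 0)
          simpa [sub_eq_add_neg, neg_one_mul] using this
        rw [h1]; ring
      · exact Int.sub_emod_right cnt K
  | case2 cnt ans h =>
      rw [whileLoop, dif_neg h]
      have hlt : cnt < K := by omega
      rw [Int.ediv_eq_zero_of_lt hc hlt, Int.emod_eq_of_lt hc hlt]
      simp

-- ---- basic invariant facts ----
theorem MF_nonneg (K : Int) (f : PForest) (hK : 1 ≤ K) : 0 ≤ MF K f := by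
  induction f with
  | nil => simp [MF]
  | cons b c f sib ihf ihs =>
      have := Int.emod_nonneg (c + SF f) (by omega : K ≠ 0)
      simp only [MF]; omega

theorem MF_eq (K : Int) (f : PForest) : MF K f = SF f - K * QF K f := by
  induction f with
  | nil => simp [MF, SF, QF]
  | cons b c f sib ihf ihs =>
      simp only [MF, SF, QF]
      have := Int.mul_ediv_add_emod (c + SF f) K
      rw [ihs]; ring_nf; omega

-- ---- dfs characterization ----
theorem dfsF_eq (K : Int) (hK : 1 ≤ K) (f : PForest) (hw : WFF f) (d : Int) :
    dfsF f K d = ((d - 1) * QF K f + ((entF f).map (fun e => e.2 / K)).sum, MF K f) := by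
  induction f generalizing d with
  | nil => simp [dfsF, QF, entF, MF]
  | cons b c f sib ihf ihs =>
      obtain ⟨h1, h2, h3, h4, h5⟩ := hw
      have hMf := MF_nonneg K f hK
      have hcnt : c + MF K f = (c + SF f) + K * (-(QF K f)) := by
        rw [MF_eq]; ring
      simp only [dfsF, ihf h4, ihs h5]
      rw [whileLoop_eq K _ _ _ hK (by omega)]
      have hdiv : (c + MF K f) / K = (c + SF f) / K - QF K f := by
        rw [hcnt, Int.add_mul_ediv_left _ _ (by omega : K ≠ 0)]; ring
      have hmod : (c + MF K f) % K = (c + SF f) % K := by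
        rw [hcnt, Int.add_mul_emod_self_left]
      rw [hdiv, hmod]
      simp only [entF, QF, MF, List.map_cons, List.map_append, List.map_map,
        List.sum_cons, List.sum_append, Function.comp_def, Prod.mk.injEq]
      exact ⟨by ring, trivial⟩

-- ---- newNode ----
theorem newNode_total (p : List Char) : (newNode p).1 + SF (newNode p).2 = 1 := by
  induction p with
  | nil => simp [newNode, SF]
  | cons b p ih => simp only [newNode, SF] at *; omega

theorem newNode_WF (p : List Char) : 0 ≤ (newNode p).1 ∧ WFF (newNode p).2 := by
  induction p with
  | nil => simp [newNode, WFF]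
  | cons b p ih =>
      refine ⟨by simp [newNode], ?_⟩
      have ht := newNode_total p
      simp only [newNode, WFF, charsF]
      exact ⟨ih.1, by omega, by simp, ih.2, trivial⟩

theorem newNode_Sat (a : Char) (p q : List Char) :
    SatF (PForest.cons a (newNode p).1 (newNode p).2 PForest.nil) q
      = if q ≠ [] ∧ q <+: (a :: p) then 1 else 0 := by
  induction p generalizing a q with
  | nil =>
      match q with
      | [] => simp [SatF]
      | x :: r =>
          by_cases hax : a = x
          · subst hax
            match r with
            | [] => simp [SatF, newNode, SF]
            | y :: r' => simp [SatF, newNode, List.cons_prefix_cons]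
          · simp [SatF, Ne.symm hax, List.cons_prefix_cons, hax]
  | cons z p' ih =>
      match q with
      | [] => simp [SatF]
      | x :: r =>
          by_cases hax : a = x
          · subst hax
            match r with
            | [] =>
                have ht := newNode_total p'
                simp only [SatF, newNode, SF, List.cons_prefix_cons]
                simp at ht ⊢
                omega
            | y :: r' =>
                have := ih z (y :: r')
                simp only [SatF, newNode] at this ⊢
                rw [this]
                simp [List.cons_prefix_cons]
          · simp [SatF, Ne.symm hax, List.cons_prefix_cons, hax]

-- ---- insert ----
theorem insertC_SF (f : PForest) (a : Char) (p : List Char) :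
    SF (insertC f a p) = SF f + 1 := by
  induction f, a, p using insertC.induct with
  | case1 a p =>
      have := newNode_total p
      simp only [insertC, SF]; omega
  | case2 c f sib a => rw [insertC, if_pos rfl]; simp only [SF]; omega
  | case3 c f sib a b p ih => rw [insertC, if_pos rfl]; simp only [SF, ih]; omega
  | case4 b c f sib a p hba ih => simp only [insertC, if_neg hba, SF, ih]; omega

theorem insertC_Sat (f : PForest) (a : Char) (p q : List Char) :
    SatF (insertC f a p) q = SatF f q + (if q ≠ [] ∧ q <+: (a :: p) then 1 else 0) := by
  induction f, a, p using insertC.induct generalizing q with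
  | case1 a p =>
      rw [insertC, newNode_Sat a p q]
      match q with
      | [] => simp [SatF]
      | x :: r => simp [SatF]
  | case2 c f sib a =>
      rw [insertC, if_pos rfl]
      match q with
      | [] => simp [SatF]
      | x :: r =>
          by_cases hax : a = x
          · subst hax
            match r with
            | [] => simp [SatF]; omega
            | y :: r' => simp [SatF, List.cons_prefix_cons]
          · simp [SatF, Ne.symm hax, hax, List.cons_prefix_cons]
  | case3 c f sib a b p ih =>
      rw [insertC, if_pos rfl]
      match q with
      | [] => simp [SatF]
      | x :: r =>
          by_cases hax : a = x
          · subst hax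
            match r with
            | [] => simp [SatF, insertC_SF, List.cons_prefix_cons]; omega
            | y :: r' =>
                have := ih (q := y :: r')
                simp only [SatF] at this ⊢
                rw [this]
                simp [List.cons_prefix_cons]
          · simp [SatF, Ne.symm hax, hax, List.cons_prefix_cons]
  | case4 b c f sib a p hba ih =>
      rw [insertC.eq_def]
      simp only [if_neg hba]
      match q with
      | [] => simp [SatF]
      | x :: r =>
          by_cases hbx : b = x
          · subst hbx
            have hcond : ¬(b :: r ≠ [] ∧ b :: r <+: a :: p) := by
              rintro ⟨-, hpre⟩
              rw [List.cons_prefix_cons] at hpre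
              exact hba hpre.1
            rw [if_neg hcond, add_zero]
            match r with
            | [] => simp [SatF]
            | y :: r' => simp [SatF]
          · simp only [SatF, if_neg hbx]
            rw [ih (q := x :: r)]

theorem insertC_chars (f : PForest) (a : Char) (p : List Char) (x : Char)
    (hx : x ∈ charsF (insertC f a p)) : x = a ∨ x ∈ charsF f := by
  induction f, a, p using insertC.induct with
  | case1 a p => simp [insertC, charsF] at hx; exact Or.inl hx
  | case2 c f sib a => simp only [insertC, charsF] at hx ⊢; tauto
  | case3 c f sib a b p ih => simp only [insertC, charsF] at hx ⊢; tauto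
  | case4 b c f sib a p hba ih =>
      simp only [insertC, if_neg hba, charsF, List.mem_cons] at hx ⊢
      rcases hx with h | h
      · tauto
      · rcases ih h with h' | h' <;> tauto

theorem insertC_WF (f : PForest) (a : Char) (p : List Char) (h : WFF f) :
    WFF (insertC f a p) := by
  induction f, a, p using insertC.induct with
  | case1 a p =>
      have ht := newNode_total p
      have hw := newNode_WF p
      simp only [insertC, WFF, charsF]
      exact ⟨hw.1, by omega, by simp, hw.2, trivial⟩
  | case2 c f sib a =>
      obtain ⟨h1, h2, h3, h4, h5⟩ := h
      simp only [insertC]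
      exact ⟨by omega, by omega, h3, h4, h5⟩
  | case3 c f sib a b p ih =>
      obtain ⟨h1, h2, h3, h4, h5⟩ := h
      simp only [insertC]
      refine ⟨h1, ?_, h3, ih h4, h5⟩
      rw [insertC_SF]; omega
  | case4 b c f sib a p hba ih =>
      obtain ⟨h1, h2, h3, h4, h5⟩ := h
      simp only [insertC, if_neg hba, WFF]
      refine ⟨h1, h2, ?_, h4, ih h5⟩
      intro hb
      rcases insertC_chars sib a p b hb with h' | h'
      · exact hba h'
      · exact h3 h'

-- ---- entries vs Sat ----
theorem entF_head (f : PForest) (e : List Char × Int) (he : e ∈ entF f) :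
    ∃ b r, e.1 = b :: r ∧ b ∈ charsF f := by
  induction f with
  | nil => simp [entF] at he
  | cons b c f sib ihf ihs =>
      simp only [entF, List.mem_cons, List.mem_append, List.mem_map] at he
      rcases he with h | ⟨e', he', rfl⟩ | h
      · subst h; exact ⟨b, [], rfl, by simp [charsF]⟩
      · exact ⟨b, e'.1, rfl, by simp [charsF]⟩
      · obtain ⟨b', r', h1, h2⟩ := ihs h
        exact ⟨b', r', h1, by simp [charsF, h2]⟩

theorem entF_Sat (f : PForest) (h : WFF f) (e : List Char × Int) (he : e ∈ entF f) :
    SatF f e.1 = e.2 := by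
  revert h e
  induction f with
  | nil => intro h e he; simp [entF] at he
  | cons b c f sib ihf ihs =>
      intro h e he
      obtain ⟨h1, h2, h3, h4, h5⟩ := h
      simp only [entF, List.mem_cons, List.mem_append, List.mem_map] at he
      rcases he with h | ⟨e', he', rfl⟩ | h
      · subst h; simp [SatF]
      · obtain ⟨b', r', hb', -⟩ := entF_head f e' he'
        have := ihf h4 e' he'
        simp only [SatF]
        rw [hb'] at this ⊢
        simpa using this
      · obtain ⟨b', r', hb', hmem⟩ := entF_head sib e h
        have hne : ¬(b = b') := fun hc => h3 (hc ▸ hmem)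
        rw [hb']
        simp only [SatF, if_neg hne]
        rw [← hb', ihs h5 e h]

theorem entF_pos (f : PForest) (h : WFF f) (e : List Char × Int) (he : e ∈ entF f) :
    1 ≤ e.2 := by
  revert h e
  induction f with
  | nil => intro h e he; simp [entF] at he
  | cons b c f sib ihf ihs =>
      intro h e he
      obtain ⟨h1, h2, h3, h4, h5⟩ := h
      simp only [entF, List.mem_cons, List.mem_append, List.mem_map] at he
      rcases he with h | ⟨e', he', rfl⟩ | h
      · subst h; exact h2
      · exact ihf h4 e' he'
      · exact ihs h5 e h

theorem entF_nodup (f : PForest) (h : WFF f) : ((entF f).map (·.1)).Nodup := by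
  revert h
  induction f with
  | nil => intro h; simp [entF]
  | cons b c f sib ihf ihs =>
      intro h
      obtain ⟨h1, h2, h3, h4, h5⟩ := h
      have hinj : Function.Injective (fun l => (b :: l : List Char)) :=
        fun x y hxy => by simpa using hxy
      simp only [entF, List.map_cons, List.map_append, List.map_map]
      have hmapeq : (entF f).map ((·.1) ∘ fun e => ((b :: e.1, e.2) : List Char × Int))
          = ((entF f).map (·.1)).map (fun l => b :: l) := by
        simp [List.map_map, Function.comp_def]
      rw [List.nodup_cons, hmapeq]
      refine ⟨?_, List.Nodup.append ((ihf h4).map hinj) (ihs h5) ?_⟩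
      · intro hmem
        rcases List.mem_append.mp hmem with hm | hm
        · obtain ⟨q, hq, hq2⟩ := List.mem_map.mp hm
          obtain ⟨e, he, rfl⟩ := List.mem_map.mp hq
          obtain ⟨b', r', hb', -⟩ := entF_head f e he
          rw [hb'] at hq2
          simp at hq2
        · obtain ⟨e, he, he1⟩ := List.mem_map.mp hm
          obtain ⟨b', r', hb', hbc⟩ := entF_head sib e he
          rw [hb'] at he1
          obtain ⟨rfl, -⟩ := List.cons.inj he1
          exact h3 hbc
      · intro x hx hx2
        obtain ⟨q, hq, rfl⟩ := List.mem_map.mp hx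
        obtain ⟨e, he, he1⟩ := List.mem_map.mp hx2
        obtain ⟨b', r', hb', hbc⟩ := entF_head sib e he
        rw [hb'] at he1
        obtain ⟨rfl, -⟩ := List.cons.inj he1
        exact h3 hbc

theorem entF_mem_of_Sat (f : PForest) :
    ∀ q : List Char, SatF f q ≠ 0 → q ∈ (entF f).map (·.1) := by
  induction f with
  | nil =>
      intro q hq
      match q with
      | [] => simp [SatF] at hq
      | x :: r => simp [SatF] at hq
  | cons b c f sib ihf ihs =>
      intro q hq
      match q with
      | [] => simp [SatF] at hq
      | x :: r =>
          by_cases hbx : b = x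
          · subst hbx
            match r with
            | [] => simp [entF]
            | y :: r' =>
                simp only [SatF] at hq
                have := ihf (y :: r') hq
                obtain ⟨e, he, hq'⟩ := List.mem_map.mp this
                simp only [entF, List.map_cons, List.map_append, List.map_map,
                  List.mem_cons, List.mem_append, List.mem_map, Function.comp_apply]
                exact Or.inr (Or.inl ⟨e, he, by rw [hq']⟩)
          · simp only [SatF, if_neg hbx] at hq
            have := ihs (x :: r) hq
            obtain ⟨e, he, hq'⟩ := List.mem_map.mp this
            simp only [entF, List.map_cons, List.map_append, List.map_map,
              List.mem_cons, List.mem_append, List.mem_map, Function.comp_apply]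
            exact Or.inr (Or.inr ⟨e, he, hq'⟩)

theorem entF_mem_iff (f : PForest) (h : WFF f) (q : List Char) :
    q ∈ (entF f).map (·.1) ↔ SatF f q ≠ 0 := by
  constructor
  · intro hq
    obtain ⟨e, he, rfl⟩ := List.mem_map.mp hq
    rw [entF_Sat f h e he]
    have := entF_pos f h e he
    omega
  · exact entF_mem_of_Sat f q

-- ---- the built trie ----
theorem SatF_nil (q : List Char) : SatF PForest.nil q = 0 := by
  match q with
  | [] => rfl
  | _ :: _ => rfl

theorem build_WF (ss : List String) (z : Int × PForest) (h : WFF z.2) :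
    WFF (ss.foldl (fun t s => insertS t s.toList) z).2 := by
  induction ss generalizing z with
  | nil => simpa using h
  | cons s ss ih =>
      simp only [List.foldl_cons]
      apply ih
      obtain ⟨c, f⟩ := z
      cases hs : s.toList with
      | nil => simpa [insertS] using h
      | cons a p => simpa [insertS] using insertC_WF f a p h

theorem build_cnt_nonneg (ss : List String) (z : Int × PForest) (h : 0 ≤ z.1) :
    0 ≤ (ss.foldl (fun t s => insertS t s.toList) z).1 := by
  induction ss generalizing z with
  | nil => simpa using h
  | cons s ss ih =>
      simp only [List.foldl_cons]
      apply ih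
      obtain ⟨c, f⟩ := z
      cases hs : s.toList with
      | nil => simp [insertS]; omega
      | cons a p => simpa [insertS] using h

theorem count_prefCL (l : List Char) (q : List Char) :
    ((prefCL l).count q : Int) = if q ≠ [] ∧ q <+: l then 1 else 0 := by
  have base : (prefCL l).count q = (if q ≠ [] ∧ q <+: l then 1 else 0 : Nat) := by
    by_cases h : q ≠ [] ∧ q <+: l
    · rw [if_pos h]
      obtain ⟨hne, hpre⟩ := h
      have hlen : 1 ≤ q.length := by cases q with | nil => exact absurd rfl hne | cons _ _ => simp
      have hlenle : q.length ≤ l.length := hpre.length_le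
      have hq : q = l.take q.length := List.prefix_iff_eq_take.mp hpre
      unfold prefCL
      rw [List.count_eq_countP, List.countP_map]
      have hcongr : ∀ k ∈ List.range l.length,
          (((fun x => x == q) ∘ fun k => l.take (k + 1)) k = true ↔ (k == q.length - 1) = true) := by
        intro k hk
        have hk' : k < l.length := List.mem_range.mp hk
        simp only [Function.comp_apply, beq_iff_eq]
        constructor
        · intro htake
          have : (l.take (k + 1)).length = q.length := by rw [htake]
          rw [List.length_take] at this
          omega
        · intro hk2
          have : k + 1 = q.length := by omega
          rw [this, ← hq]
      rw [List.countP_congr hcongr]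
      rw [← List.count_eq_countP, List.count_eq_one_of_mem List.nodup_range
        (List.mem_range.mpr (by omega))]
    · rw [if_neg h]
      unfold prefCL
      rw [List.count_eq_countP, List.countP_map, List.countP_eq_zero.mpr]
      intro k hk
      have hk' : k < l.length := List.mem_range.mp hk
      simp only [Function.comp_apply, beq_iff_eq]
      intro htake
      apply h
      constructor
      · rw [← htake]
        have : l ≠ [] := by intro hl; rw [hl] at hk'; simp at hk'
        simp [List.take_eq_nil_iff, this]
      · rw [← htake]; exact List.take_prefix _ _
  rw [base]
  split <;> simp

theorem build_Sat (ss : List String) (z : Int × PForest) (q : List Char) :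
    SatF (ss.foldl (fun t s => insertS t s.toList) z).2 q
      = SatF z.2 q + ((allP ss).count q : Int) := by
  induction ss generalizing z with
  | nil => simp [allP]
  | cons s ss ih =>
      simp only [List.foldl_cons]
      rw [ih]
      have hstep : SatF (insertS z s.toList).2 q = SatF z.2 q + ((prefCL s.toList).count q : Int) := by
        obtain ⟨c, f⟩ := z
        cases hs : s.toList with
        | nil => simp [insertS, prefCL]
        | cons a p =>
            simp only [insertS]
            rw [insertC_Sat, count_prefCL]
      rw [hstep]
      have : allP (s :: ss) = prefCL s.toList ++ allP ss := by simp [allP]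
      rw [this, List.count_append]
      push_cast
      ring

-- ---- assembling the two sides ----
theorem mapToList_prefixesOf (s : String) :
    (prefixesOf s).map String.toList = prefCL s.toList := by
  unfold prefixesOf prefCL
  rw [List.map_map, PySem.List.pyRange_one, List.map_map]
  have hlen : (PySem.Str.len s + 1 - 1).toNat = s.toList.length := by
    simp [PySem.Str.len_eq]
  rw [hlen]
  apply List.map_congr_left
  intro k hk
  simp only [Function.comp_apply]
  have h1 : (0 : Int) ≤ 1 + (k : Int) := by positivity
  have h2 : (PySem.Str.slice s none (some (1 + (k : Int)))).toList
      = PySem.List.slice s.toList none (some (1 + (k : Int))) := by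
    simp [PySem.Str.slice]
  rw [h2, PySem.List.slice_to _ h1]
  congr 1
  omega

theorem solveA_eq (N K : Int) (strings : List String) (hK : 1 ≤ K) :
    solve N K strings
      = (((PySem.List.dedup (allP strings))).map
          (fun q => (((allP strings).count q : Int)) / K)).sum := by
  have hwfnil : WFF (PForest.nil) := by simp [WFF]
  set z := strings.foldl (fun t s => insertS t s.toList) (0, PForest.nil) with hz
  have hWF : WFF z.2 := build_WF strings _ hwfnil
  have hc : 0 ≤ z.1 := build_cnt_nonneg strings _ (by simp)
  have hSat : ∀ q, SatF z.2 q = ((allP strings).count q : Int) := by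
    intro q
    rw [hz, build_Sat]
    simp [SatF_nil]
  have hMF : 0 ≤ MF K z.2 := MF_nonneg K z.2 hK
  show (whileLoop K (z.1 + (dfsF z.2 K 1).2) (dfsF z.2 K 1).1 0).1 = _
  rw [dfsF_eq K hK z.2 hWF 1]
  simp only []
  rw [whileLoop_eq K _ _ _ hK (by omega)]
  simp only [sub_self, zero_mul, zero_add]
  have hE : ((entF z.2).map (fun e => e.2 / K)).sum
      = (((entF z.2).map (·.1)).map (fun q => (((allP strings).count q : Int)) / K)).sum := by
    rw [List.map_map]
    apply congrArg
    apply List.map_congr_left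
    intro e he
    simp only [Function.comp_apply]
    rw [← hSat e.1, entF_Sat z.2 hWF e he]
  have hperm : ((entF z.2).map (·.1)).Perm (PySem.List.dedup (allP strings)) := by
    rw [List.perm_ext_iff_of_nodup (entF_nodup z.2 hWF) (PySem.List.nodup_dedup _)]
    intro q
    rw [PySem.List.mem_dedup, entF_mem_iff z.2 hWF q, hSat q]
    rw [← List.count_pos_iff]
    omega
  rw [add_zero, hE]
  exact (hperm.map _).sum_eq

theorem solveB_eq (N K : Int) (strings : List String) (hK : 1 ≤ K) :
    solve_alt N K strings
      = (((PySem.List.dedup (allP strings))).map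
          (fun q => (((allP strings).count q : Int)) / K)).sum := by
  have hinj : Function.Injective String.toList := fun _ _ h => String.toList_injective h
  show (((strings.flatMap prefixesOf).foldl
      (fun d p => d.insert p (d.getD p 0 + 1)) PySem.Dict.empty).values.map
        (fun c => PySem.Int.floordiv c K)).sum = _
  set P := strings.flatMap prefixesOf with hP
  have hL : P.map String.toList = allP strings := by
    rw [hP, List.map_flatMap]
    unfold allP
    simp only [mapToList_prefixesOf]
  rw [PySem.Dict.foldl_insert_getD_add_one_eq_counter]
  have hvals : (PySem.Dict.counter P).values
      = (PySem.List.dedup P).map (fun k => (P.count k : Int)) := by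
    have := PySem.Dict.items_counter P
    simp only [PySem.Dict.values, this, List.map_map, PySem.List.dedup_eq_ofList]
    rfl
  rw [hvals, List.map_map]
  have hstep : ∀ p, PySem.Int.floordiv ((P.count p : Int)) K = ((P.count p : Int)) / K :=
    fun p => PySem.Int.floordiv_eq_ediv_of_pos (by omega)
  have hmapeq : ((PySem.List.dedup P).map ((fun c => PySem.Int.floordiv c K) ∘ fun k => (P.count k : Int)))
      = (((PySem.List.dedup P).map String.toList).map
          (fun q => (((allP strings).count q : Int)) / K)) := by
    rw [List.map_map]
    apply List.map_congr_left
    intro p hp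
    simp only [Function.comp_apply]
    rw [hstep p, ← hL, List.count_map_of_injective _ _ hinj]
  rw [hmapeq]
  have hperm : ((PySem.List.dedup P).map String.toList).Perm (PySem.List.dedup (allP strings)) := by
    rw [List.perm_ext_iff_of_nodup ((PySem.List.nodup_dedup P).map hinj) (PySem.List.nodup_dedup _)]
    intro q
    rw [PySem.List.mem_dedup, ← hL]
    simp only [List.mem_map]
    constructor
    · rintro ⟨p, hp, rfl⟩
      exact ⟨p, (PySem.List.mem_dedup P p).mp hp, rfl⟩
    · rintro ⟨p, hp, rfl⟩
      exact ⟨p, (PySem.List.mem_dedup P p).mpr hp, rfl⟩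
  exact (hperm.map _).sum_eq

-- ===== VERDICT (by name: the statement is the Claim_ definition above) =====
theorem solve_spec : Claim_equal_solve := by
  intro N K strings _ hK
  unfold Spec_solve
  rw [solveA_eq N K strings hK, solveB_eq N K strings hK]
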